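-- pv_equiv track=rewrite | github.com/Hurri08/Pr0poll | modules/allianz/allianz.py | _getStringFromPlanets
-- ===== SOURCE A (Python) =====
-- def _getStringFromPlanets(planets: list, gal: str):
--     if len(planets) == 0:
--         return f"``` Keine bekannte Planeten in galaxy {gal} ```"
--
--     returnStr = "```"
--     for idx,pos in enumerate(planets):
--         if (idx%5==0):
--             returnStr += "\n"
--         returnStr += "{:10}".format(gal + ":" + str(pos[0]) + ":" + str(pos[1]))
--
--     return returnStr + "```"
-- ===== SOURCE B (Python) =====
-- def _getStringFromPlanets(planets: list, gal: str):
--     if not planets: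
--         return f"``` Keine bekannte Planeten in galaxy {gal} ```"
--     cells = ["{:10}".format(gal + ":" + str(p[0]) + ":" + str(p[1])) for p in planets]
--     lines = ["\n" + "".join(cells[i:i+5]) for i in range(0, len(cells), 5)]
--     return "```" + "".join(lines) + "```"
-- ===== Notes on version B (the rewrite author's own statement) =====
-- stated objective: alternative
-- what changed: Replaces A's single pass with a per-index idx%5 newline test by explicitly chunking the planets into rows of five, formatting each row as a joined line, and concatenating the lines.
import Mathlib
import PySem

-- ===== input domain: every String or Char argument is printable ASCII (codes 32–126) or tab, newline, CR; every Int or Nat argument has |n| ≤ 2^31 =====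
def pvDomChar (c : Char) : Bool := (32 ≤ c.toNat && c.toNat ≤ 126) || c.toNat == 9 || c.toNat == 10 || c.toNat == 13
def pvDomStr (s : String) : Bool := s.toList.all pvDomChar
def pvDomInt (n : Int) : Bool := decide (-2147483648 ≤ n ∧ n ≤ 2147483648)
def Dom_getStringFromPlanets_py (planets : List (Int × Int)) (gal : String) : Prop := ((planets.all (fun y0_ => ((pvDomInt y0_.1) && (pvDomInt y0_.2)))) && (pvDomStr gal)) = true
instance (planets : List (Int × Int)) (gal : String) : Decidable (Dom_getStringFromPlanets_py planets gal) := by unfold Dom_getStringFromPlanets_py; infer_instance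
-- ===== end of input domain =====

-- B replaces A's per-index `idx % 5 == 0` newline test by explicitly chunking the planets
-- into rows of five and joining the formatted cells per row (objective: alternative decomposition).
-- Strings are assembled as List Char and wrapped with String.ofList at the end, which is exact on this domain.

-- ===== PORT A =====
-- '{:10}'.format(gal + ":" + str(pos[0]) + ":" + str(pos[1])) : left-justified pad to width 10
def pvCell (gal : String) (p : Int × Int) : List Char :=
  let s := gal.toList ++ (':' :: PySem.Int.toChars p.1) ++ (':' :: PySem.Int.toChars p.2)
  s ++ List.replicate (10 - s.length) ' '

-- the for-loop of A: enumerate counter idx, accumulator returnStr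
def pvLoopA (gal : String) : Nat → List (Int × Int) → List Char → List Char
  | _, [], acc => acc
  | idx, p :: rest, acc =>
      pvLoopA gal (idx + 1) rest ((if idx % 5 == 0 then acc ++ ['\n'] else acc) ++ pvCell gal p)

def getStringFromPlanets_py (planets : List (Int × Int)) (gal : String) : String :=
  if planets.length == 0 then
    String.ofList ("``` Keine bekannte Planeten in galaxy ".toList ++ gal.toList ++ " ```".toList)
  else
    String.ofList (pvLoopA gal 0 planets "```".toList ++ "```".toList)

-- ===== PORT B =====
-- consecutive chunks of five (cells[i:i+5] for i in range(0, len, 5))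
def pvChunks : List (Int × Int) → List (List (Int × Int))
  | [] => []
  | p :: rest => (p :: rest.take 4) :: pvChunks (rest.drop 4)
termination_by l => l.length
decreasing_by simp

-- one display line: "\n" + "".join(cells in the chunk)
def pvLine (gal : String) (c : List (Int × Int)) : List Char :=
  '\n' :: (c.map (pvCell gal)).flatten

def getStringFromPlanets_py_alt (planets : List (Int × Int)) (gal : String) : String :=
  if planets.isEmpty then
    String.ofList ("``` Keine bekannte Planeten in galaxy ".toList ++ gal.toList ++ " ```".toList)
  else
    String.ofList ("```".toList ++ ((pvChunks planets).map (pvLine gal)).flatten ++ "```".toList)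

-- ===== PRECONDITION & SPEC =====
def Spec_getStringFromPlanets_py (planets : List (Int × Int)) (gal : String) (out : String) : Prop := out = getStringFromPlanets_py_alt planets gal
instance (planets : List (Int × Int)) (gal : String) (out : String) : Decidable (Spec_getStringFromPlanets_py planets gal out) := by unfold Spec_getStringFromPlanets_py; infer_instance

-- ===== CLAIM (what is proved, stated in full; the proofs are below) =====
def Claim_equal_getStringFromPlanets_py : Prop := ∀ (planets : List (Int × Int)) (gal : String), Dom_getStringFromPlanets_py planets gal → Spec_getStringFromPlanets_py planets gal (getStringFromPlanets_py planets gal)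

-- ===== LEMMAS AND PROOFS =====

-- the loop's newline decision only depends on idx mod 5
theorem pvLoopA_mod (gal : String) : ∀ (l : List (Int × Int)) (i : Nat) (acc : List Char),
    pvLoopA gal i l acc = pvLoopA gal (i % 5) l acc := by
  intro l
  induction l with
  | nil => intro i acc; simp [pvLoopA]
  | cons p rest ih =>
    intro i acc
    have h1 : i % 5 % 5 = i % 5 := by omega
    have h2 : (i + 1) % 5 = (i % 5 + 1) % 5 := by omega
    simp only [pvLoopA, h1]
    rw [ih (i + 1), ih (i % 5 + 1), h2]

-- A's loop from index 0 produces exactly B's chunked lines, appended to the accumulator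
theorem pvLoopA_eq (gal : String) : ∀ (l : List (Int × Int)) (acc : List Char),
    pvLoopA gal 0 l acc = acc ++ ((pvChunks l).map (pvLine gal)).flatten := by
  suffices h : ∀ (n : Nat) (l : List (Int × Int)), l.length ≤ n → ∀ acc,
      pvLoopA gal 0 l acc = acc ++ ((pvChunks l).map (pvLine gal)).flatten by
    intro l acc; exact h l.length l le_rfl acc
  intro n
  induction n with
  | zero =>
    intro l hl acc
    have : l = [] := List.length_eq_zero_iff.mp (Nat.le_zero.mp hl)
    subst this; simp [pvLoopA, pvChunks.eq_def]
  | succ n ih =>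
    intro l hl acc
    match l with
    | [] => simp [pvLoopA, pvChunks.eq_def]
    | [a] => simp [pvLoopA, pvChunks.eq_def, pvLine]
    | [a, b] => simp [pvLoopA, pvChunks.eq_def, pvLine]
    | [a, b, c] => simp [pvLoopA, pvChunks.eq_def, pvLine]
    | [a, b, c, d] => simp [pvLoopA, pvChunks.eq_def, pvLine]
    | a :: b :: c :: d :: e :: rest =>
      have hr : rest.length ≤ n := by simp at hl; omega
      simp only [pvLoopA]
      rw [pvLoopA_mod gal rest 5]
      rw [ih rest hr]
      conv_rhs => rw [pvChunks.eq_def]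
      simp [pvLine, List.append_assoc]

-- ===== VERDICT (by name: the statement is the Claim_ definition above) =====
theorem getStringFromPlanets_py_spec : Claim_equal_getStringFromPlanets_py := by
  unfold Claim_equal_getStringFromPlanets_py
  intro planets gal _
  unfold Spec_getStringFromPlanets_py getStringFromPlanets_py getStringFromPlanets_py_alt
  cases planets with
  | nil => simp
  | cons p rest =>
    simp only [List.length_cons, List.isEmpty_cons]
    rw [pvLoopA_eq]
    simp
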